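-- pv_equiv track=rewrite | github.com/youtubediscord/zapret | ui/pages/strategies_page.py | _format_cmd_for_display
-- ===== SOURCE A (Python) =====
-- def _format_cmd_for_display(cmd_parts: list) -> str:
--     """Форматирует командную строку для удобного отображения"""
--     lines = []
--     current_line = []
--
--     for part in cmd_parts:
--         if part == '--new':
--             # Сохраняем текущую строку
--             if current_line:
--                 lines.append(' '.join(current_line))
--                 current_line = []
--             lines.append('--new')
--         else:
--             current_line.append(part)
--
--     # Добавляем последнюю строку
--     if current_line:
--         lines.append(' '.join(current_line))
--
--     return '\n'.join(lines)
-- ===== SOURCE B (Python) =====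
-- def _format_cmd_for_display(cmd_parts: list) -> str:
--     # Group-then-format: split the list into maximal runs of equal kind
--     # ('--new' vs. other), format each run as one piece, join pieces once.
--     pieces = []
--     i, n = 0, len(cmd_parts)
--     while i < n:
--         k = cmd_parts[i] == '--new'
--         j = i
--         while j < n and (cmd_parts[j] == '--new') == k:
--             j += 1
--         run = cmd_parts[i:j]
--         pieces.append('\n'.join(run) if k else ' '.join(run))
--         i = j
--     return '\n'.join(pieces)
-- ===== Notes on version B (the rewrite author's own statement) =====
-- stated objective: alternative
-- what changed: Replaced the accumulate-and-flush pass with buffer/flush state by a run-partition decomposition: the list is split into maximal runs of equal kind ('--new' vs other), each run is formatted as one piece ('\n'-join for '--new' runs, ' '-join otherwise), and the pieces are joined once.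
import Mathlib
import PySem

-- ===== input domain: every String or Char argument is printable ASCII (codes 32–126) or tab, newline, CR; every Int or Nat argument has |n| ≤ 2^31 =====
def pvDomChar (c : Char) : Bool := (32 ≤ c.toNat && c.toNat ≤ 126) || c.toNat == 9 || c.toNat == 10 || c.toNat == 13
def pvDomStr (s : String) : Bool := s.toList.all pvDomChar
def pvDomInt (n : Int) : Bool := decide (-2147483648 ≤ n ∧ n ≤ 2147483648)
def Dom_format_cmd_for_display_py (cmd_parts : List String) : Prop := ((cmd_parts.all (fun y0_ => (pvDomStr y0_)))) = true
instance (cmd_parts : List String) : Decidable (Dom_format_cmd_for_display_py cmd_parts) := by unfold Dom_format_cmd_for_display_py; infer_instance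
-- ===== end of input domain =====

-- B replaces A's accumulate-and-flush pass by a run-partition decomposition (maximal
-- runs of '--new' vs other tokens, each formatted as one piece); same cost, alternative structure.

-- ===== PORT A =====
-- the for-loop of A over (lines, current_line)
def pvA_loop (parts lines cur : List String) : List String :=
  match parts with
  | [] => if cur.isEmpty then lines else lines ++ [PySem.Str.join " " cur]
  | p :: rest =>
    if p == "--new" then
      pvA_loop rest ((if cur.isEmpty then lines else lines ++ [PySem.Str.join " " cur]) ++ ["--new"]) []
    else
      pvA_loop rest lines (cur ++ [p])

def format_cmd_for_display_py (cmd_parts : List String) : String :=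
  PySem.Str.join "\n" (pvA_loop cmd_parts [] [])

-- ===== PORT B =====
-- Source B's inner while loop: the maximal run starting at the head has the head's kind k
def pvB_pred (k : Bool) (y : String) : Bool := (y == "--new") == k

-- Source B's outer while loop: split into maximal runs of equal kind
def pvB_runs (parts : List String) : List (Bool × List String) :=
  match parts with
  | [] => []
  | x :: xs =>
    let k := x == "--new"
    (k, x :: xs.takeWhile (pvB_pred k)) :: pvB_runs (xs.dropWhile (pvB_pred k))
termination_by parts.length
decreasing_by
  simp only [List.length_cons]
  exact Nat.lt_succ_of_le (List.length_dropWhile_le _ _)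

def pvB_piece : Bool × List String → String
  | (k, run) => if k then PySem.Str.join "\n" run else PySem.Str.join " " run

def format_cmd_for_display_py_alt (cmd_parts : List String) : String :=
  PySem.Str.join "\n" ((pvB_runs cmd_parts).map pvB_piece)

-- ===== PRECONDITION & SPEC =====
def Spec_format_cmd_for_display_py (cmd_parts : List String) (out : String) : Prop := out = format_cmd_for_display_py_alt cmd_parts
instance (cmd_parts : List String) (out : String) : Decidable (Spec_format_cmd_for_display_py cmd_parts out) := by unfold Spec_format_cmd_for_display_py; infer_instance

-- ===== CLAIM (what is proved, stated in full; the proofs are below) =====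
def Claim_equal_format_cmd_for_display_py : Prop := ∀ (cmd_parts : List String), Dom_format_cmd_for_display_py cmd_parts → Spec_format_cmd_for_display_py cmd_parts (format_cmd_for_display_py cmd_parts)

-- ===== LEMMAS AND PROOFS =====

-- the list of output lines A's loop produces from state cur (with lines = [])
def pvRef : List String → List String → List String
  | [], cur => if cur.isEmpty then [] else [PySem.Str.join " " cur]
  | p :: rest, cur =>
    if p == "--new" then
      (if cur.isEmpty then [] else [PySem.Str.join " " cur]) ++ "--new" :: pvRef rest []
    else
      pvRef rest (cur ++ [p])

theorem pvA_loop_eq (parts : List String) : ∀ lines cur,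
    pvA_loop parts lines cur = lines ++ pvRef parts cur := by
  induction parts with
  | nil => intro lines cur; by_cases h : cur.isEmpty <;> simp [pvA_loop, pvRef, h]
  | cons p rest ih =>
    intro lines cur
    by_cases hp : (p == "--new") = true
    · by_cases h : cur.isEmpty <;> simp [pvA_loop, pvRef, hp, h, ih]
    · simp [pvA_loop, pvRef, hp, ih]

-- the lines each run contributes in A's output
def pvLines (rs : List (Bool × List String)) : List (List String) :=
  rs.map (fun r => if r.1 then r.2 else [PySem.Str.join " " r.2])

theorem pvRef_new (xs : List String) :
    pvRef xs [] = xs.takeWhile (· == "--new") ++ pvRef (xs.dropWhile (· == "--new")) [] := by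
  induction xs with
  | nil => simp [pvRef]
  | cons y ys ih =>
    by_cases hy : (y == "--new") = true
    · have : y = "--new" := by exact eq_of_beq hy
      simp [pvRef, List.takeWhile, List.dropWhile, this, ih]
    · simp [List.takeWhile, List.dropWhile, hy]

theorem pvRef_notnew (xs : List String) : ∀ cur : List String, cur ≠ [] →
    pvRef xs cur = PySem.Str.join " " (cur ++ xs.takeWhile (fun y => !(y == "--new")))
      :: pvRef (xs.dropWhile (fun y => !(y == "--new"))) [] := by
  induction xs with
  | nil =>
    intro cur hcur
    simp [pvRef, List.isEmpty_iff, hcur]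
  | cons y ys ih =>
    intro cur hcur
    by_cases hy : (y == "--new") = true
    · simp [pvRef, hy, List.takeWhile, List.dropWhile, List.isEmpty_iff, hcur]
    · have : pvRef (y :: ys) cur = pvRef ys (cur ++ [y]) := by simp [pvRef, hy]
      rw [this, ih (cur ++ [y]) (by simp)]
      simp [List.takeWhile, List.dropWhile, hy, List.append_assoc]

theorem pvB_runs_nil : pvB_runs [] = [] := by
  rw [pvB_runs]

theorem pvB_runs_cons (x : String) (xs : List String) :
    pvB_runs (x :: xs) = ((x == "--new"), x :: xs.takeWhile (pvB_pred (x == "--new")))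
      :: pvB_runs (xs.dropWhile (pvB_pred (x == "--new"))) := by
  rw [pvB_runs]

theorem pvB_pred_true (x : String) (hx : (x == "--new") = true) :
    pvB_pred (x == "--new") = (fun y : String => y == "--new") := by
  funext y; simp [pvB_pred, hx]

theorem pvB_pred_false (x : String) (hx : (x == "--new") = false) :
    pvB_pred (x == "--new") = (fun y : String => !(y == "--new")) := by
  funext y; simp [pvB_pred, hx]

theorem pvRef_eq_flatten_aux : ∀ (n : Nat) (parts : List String), parts.length ≤ n →
    pvRef parts [] = (pvLines (pvB_runs parts)).flatten := by
  intro n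
  induction n with
  | zero =>
    intro parts h
    have hnil : parts = [] := List.eq_nil_of_length_eq_zero (Nat.le_zero.mp h)
    subst hnil
    simp [pvRef, pvB_runs_nil, pvLines]
  | succ n ih =>
    intro parts h
    cases parts with
    | nil => simp [pvRef, pvB_runs_nil, pvLines]
    | cons x xs =>
      rw [pvB_runs_cons]
      by_cases hx : (x == "--new") = true
      · have hxeq : x = "--new" := eq_of_beq hx
        rw [pvB_pred_true x hx, hx]
        have hrec := ih (xs.dropWhile (fun y : String => y == "--new"))
          (by
            have := List.length_dropWhile_le (fun y : String => y == "--new") xs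
            simp only [List.length_cons] at h
            omega)
        calc pvRef (x :: xs) [] = "--new" :: pvRef xs [] := by simp [pvRef, hx]
          _ = x :: (xs.takeWhile (fun y : String => y == "--new")
                ++ pvRef (xs.dropWhile (fun y : String => y == "--new")) []) := by
              rw [pvRef_new xs, hxeq]
          _ = (x :: xs.takeWhile (fun y : String => y == "--new"))
                ++ (pvLines (pvB_runs (xs.dropWhile (fun y : String => y == "--new")))).flatten := by
              rw [hrec]; simp
          _ = (pvLines ((true, x :: xs.takeWhile (fun y : String => y == "--new"))
                :: pvB_runs (xs.dropWhile (fun y : String => y == "--new")))).flatten := by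
              simp [pvLines]
      · have hx' : (x == "--new") = false := by simpa using hx
        rw [pvB_pred_false x hx', hx']
        have hrec := ih (xs.dropWhile (fun y : String => !(y == "--new")))
          (by
            have := List.length_dropWhile_le (fun y : String => !(y == "--new")) xs
            simp only [List.length_cons] at h
            omega)
        calc pvRef (x :: xs) [] = pvRef xs [x] := by simp [pvRef, hx]
          _ = PySem.Str.join " " ([x] ++ xs.takeWhile (fun y : String => !(y == "--new")))
                :: pvRef (xs.dropWhile (fun y : String => !(y == "--new"))) [] :=
              pvRef_notnew xs [x] (by simp)
          _ = (pvLines ((false, x :: xs.takeWhile (fun y : String => !(y == "--new")))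
                :: pvB_runs (xs.dropWhile (fun y : String => !(y == "--new"))))).flatten := by
              rw [hrec]; simp [pvLines]

theorem pvRef_eq_flatten (parts : List String) :
    pvRef parts [] = (pvLines (pvB_runs parts)).flatten :=
  pvRef_eq_flatten_aux parts.length parts le_rfl

theorem pvLines_ne_nil_aux : ∀ (n : Nat) (parts : List String), parts.length ≤ n →
    ∀ c ∈ pvLines (pvB_runs parts), c ≠ [] := by
  intro n
  induction n with
  | zero =>
    intro parts h
    have hnil : parts = [] := List.eq_nil_of_length_eq_zero (Nat.le_zero.mp h)
    subst hnil
    simp [pvB_runs_nil, pvLines]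
  | succ n ih =>
    intro parts h
    cases parts with
    | nil => simp [pvB_runs_nil, pvLines]
    | cons x xs =>
      rw [pvB_runs_cons]
      intro c hc
      have hrec := ih (xs.dropWhile (pvB_pred (x == "--new")))
        (by
          have := List.length_dropWhile_le (pvB_pred (x == "--new")) xs
          simp only [List.length_cons] at h
          omega)
      simp only [pvLines, List.map_cons, List.mem_cons] at hc
      rcases hc with hch | hct
      · cases hxx : (x == "--new") <;> simp [hxx] at hch <;> simp [hch]
      · exact hrec c (by simpa [pvLines] using hct)

theorem pvLines_ne_nil (parts : List String) :
    ∀ c ∈ pvLines (pvB_runs parts), c ≠ [] :=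
  pvLines_ne_nil_aux parts.length parts le_rfl

theorem sjoin_singleton (sep : String) (p : String) : PySem.Str.join sep [p] = p := by
  rw [← String.toList_inj]
  simp [PySem.Str.toList_join, PySem.Chars.join_singleton]

theorem cjoin_append (sep : List Char) (l m : List (List Char)) (hl : l ≠ []) (hm : m ≠ []) :
    PySem.Chars.join sep (l ++ m) = PySem.Chars.join sep l ++ sep ++ PySem.Chars.join sep m := by
  induction l with
  | nil => exact absurd rfl hl
  | cons a l' ih =>
    cases l' with
    | nil =>
      obtain ⟨b, m', rfl⟩ : ∃ b m', m = b :: m' := by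
        cases m with | nil => exact absurd rfl hm | cons b m' => exact ⟨b, m', rfl⟩
      simp [PySem.Chars.join_cons_cons, PySem.Chars.join_singleton]
    | cons b l'' =>
      have h1 : (a :: b :: l'') ++ m = a :: b :: (l'' ++ m) := rfl
      rw [h1, PySem.Chars.join_cons_cons]
      have h2 : (b :: l'') ++ m = b :: (l'' ++ m) := rfl
      rw [← h2, ih (by simp), PySem.Chars.join_cons_cons]
      simp [List.append_assoc]

theorem sjoin_append (sep : String) (l m : List String) (hl : l ≠ []) (hm : m ≠ []) :
    PySem.Str.join sep (l ++ m) = PySem.Str.join sep l ++ sep ++ PySem.Str.join sep m := by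
  rw [← String.toList_inj]
  simp only [PySem.Str.toList_join, String.toList_append, List.map_append]
  exact cjoin_append sep.toList _ _ (by simpa using hl) (by simpa using hm)

theorem sjoin_flatten (chunks : List (List String)) (h : ∀ c ∈ chunks, c ≠ []) :
    PySem.Str.join "\n" chunks.flatten = PySem.Str.join "\n" (chunks.map (PySem.Str.join "\n")) := by
  induction chunks with
  | nil => simp
  | cons c rest ih =>
    have hc : c ≠ [] := h c (by simp)
    cases rest with
    | nil => simp [sjoin_singleton]
    | cons r rest' =>
      have hflat : (r :: rest').flatten ≠ [] := by
        have hr : r ≠ [] := h r (by simp)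
        simp only [List.flatten_cons]
        intro habs
        exact hr (List.append_eq_nil_iff.mp habs).1
      have ihr := ih (fun c hc => h c (by simp [hc]))
      rw [List.flatten_cons, sjoin_append "\n" c (r :: rest').flatten hc hflat, ihr]
      rw [show (c :: r :: rest').map (PySem.Str.join "\n")
          = [PySem.Str.join "\n" c] ++ (PySem.Str.join "\n" r :: rest'.map (PySem.Str.join "\n"))
          from by simp]
      rw [sjoin_append "\n" _ _ (by simp) (by simp), sjoin_singleton]
      simp

theorem pvLines_map_join (rs : List (Bool × List String)) :
    (pvLines rs).map (PySem.Str.join "\n") = rs.map pvB_piece := by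
  induction rs with
  | nil => rfl
  | cons r rest ih =>
    obtain ⟨k, run⟩ := r
    cases k <;> simp only [pvLines, List.map_cons, pvB_piece, Bool.false_eq_true,
      if_false, if_true, sjoin_singleton] <;> exact congrArg _ ih

-- ===== VERDICT (by name: the statement is the Claim_ definition above) =====
theorem format_cmd_for_display_py_spec : Claim_equal_format_cmd_for_display_py := by
  intro cmd_parts _
  unfold Spec_format_cmd_for_display_py format_cmd_for_display_py format_cmd_for_display_py_alt
  rw [pvA_loop_eq cmd_parts [] [], List.nil_append, pvRef_eq_flatten,
    sjoin_flatten _ (pvLines_ne_nil cmd_parts), pvLines_map_join]
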